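-- pv_equiv track=rewrite | github.com/JackL9u/Wordish-Game | wordish/views.py | isTextValid
-- ===== SOURCE A (Python) =====
-- def isTextValid(t):
--     if len(t) != 5:
--         return False
--     else:
--         for char in t:
--             if not (ord('a') <= ord(char) <= ord('z') or ord('A') <= ord(char) <= ord('Z')):
--                 return False
--         return True
-- ===== SOURCE B (Python) =====
-- import re
--
-- _PATTERN = re.compile(r'[A-Za-z]{5}')
--
-- def isTextValid(t):
--     return _PATTERN.fullmatch(t) is not None
-- ===== Notes on version B (the rewrite author's own statement) =====
-- stated objective: idiomatic
-- what changed: Replaces the explicit length check and per-character ord-range loop with a single anchored regex fullmatch of [A-Za-z]{5} (ported in Lean as the regex's repetition-consuming matcher).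
import Mathlib
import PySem

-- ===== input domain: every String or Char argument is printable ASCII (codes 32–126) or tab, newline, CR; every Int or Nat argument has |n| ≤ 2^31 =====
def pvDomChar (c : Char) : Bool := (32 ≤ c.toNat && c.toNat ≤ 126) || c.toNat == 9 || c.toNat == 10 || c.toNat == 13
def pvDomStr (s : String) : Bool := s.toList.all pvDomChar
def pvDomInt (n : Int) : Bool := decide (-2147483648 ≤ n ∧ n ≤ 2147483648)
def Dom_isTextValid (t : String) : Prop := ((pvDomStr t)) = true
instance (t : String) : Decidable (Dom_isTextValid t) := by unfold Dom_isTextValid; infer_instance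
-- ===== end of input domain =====

-- B replaces A's explicit length check + per-character ord-range loop with an anchored
-- regex fullmatch of [A-Za-z]{5} (ported as the repetition-consuming matcher); objective: idiomatic.


-- ===== PORT A =====
-- the 'for char in t' loop with its early 'return False'
def isTextValidLoopA : List Char → Bool
  | [] => true
  | c :: cs =>
    if ¬ (('a'.toNat ≤ c.toNat ∧ c.toNat ≤ 'z'.toNat) ∨ ('A'.toNat ≤ c.toNat ∧ c.toNat ≤ 'Z'.toNat))
    then false
    else isTextValidLoopA cs

def isTextValid (t : String) : Bool :=
  if (PySem.Str.len t : Int) ≠ 5 then false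
  else isTextValidLoopA t.toList

-- ===== PORT B =====
-- hand port of re.fullmatch(r'[A-Za-z]{5}', t): exact — the anchored matcher consumes one
-- [A-Za-z]-class character per remaining repetition and succeeds iff the whole string is consumed.
def reFullmatchLetters : Nat → List Char → Bool
  | 0, [] => true
  | 0, _ :: _ => false
  | _ + 1, [] => false
  | n + 1, c :: cs =>
    if ('A' ≤ c ∧ c ≤ 'Z') ∨ ('a' ≤ c ∧ c ≤ 'z')
    then reFullmatchLetters n cs
    else false

def isTextValid_alt (t : String) : Bool := reFullmatchLetters 5 t.toList

-- ===== PRECONDITION & SPEC =====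
def Spec_isTextValid (t : String) (out : Bool) : Prop := out = isTextValid_alt t
instance (t : String) (out : Bool) : Decidable (Spec_isTextValid t out) := by unfold Spec_isTextValid; infer_instance

-- ===== CLAIM (what is proved, stated in full; the proofs are below) =====
def Claim_equal_isTextValid : Prop := ∀ (t : String), Dom_isTextValid t → Spec_isTextValid t (isTextValid t)

-- ===== LEMMAS AND PROOFS =====
theorem reFullmatchLetters_eq (cs : List Char) : ∀ (n : Nat),
    reFullmatchLetters n cs = (decide (cs.length = n) && isTextValidLoopA cs) := by
  induction cs with
  | nil => intro n; cases n <;> simp [reFullmatchLetters, isTextValidLoopA]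
  | cons c cs ih =>
    intro n
    cases n with
    | zero => simp [reFullmatchLetters]
    | succ m =>
      simp only [reFullmatchLetters, isTextValidLoopA, ih]
      have hord : (('A' ≤ c ∧ c ≤ 'Z') ∨ ('a' ≤ c ∧ c ≤ 'z')) ↔
          (('a'.toNat ≤ c.toNat ∧ c.toNat ≤ 'z'.toNat) ∨ ('A'.toNat ≤ c.toNat ∧ c.toNat ≤ 'Z'.toNat)) := by
        simp only [Char.le_def, UInt32.le_iff_toNat_le, Char.toNat]
        tauto
      simp only [hord]
      by_cases h : ('a'.toNat ≤ c.toNat ∧ c.toNat ≤ 'z'.toNat) ∨ ('A'.toNat ≤ c.toNat ∧ c.toNat ≤ 'Z'.toNat)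
      · rw [if_pos h, if_neg (not_not_intro h),
          show (decide ((c :: cs).length = m + 1)) = decide (cs.length = m) from
            decide_eq_decide.mpr (by simp)]
      · rw [if_neg h, if_pos h]
        simp

-- ===== VERDICT (by name: the statement is the Claim_ definition above) =====
theorem isTextValid_spec : Claim_equal_isTextValid := by
  intro t _
  unfold Spec_isTextValid isTextValid isTextValid_alt
  simp only [PySem.Str.len]
  rw [reFullmatchLetters_eq]
  have h : ((t.length : Int) = 5) ↔ (t.length = 5) := by omega
  by_cases hl : t.length = 5 <;> simp [hl, h]
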